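-- pv_equiv track=rewrite | github.com/GRANMOAL/Proyecto_Abeja | app.py | bfs_search_full_path
-- ===== SOURCE A (Python) =====
-- from collections import deque
--
-- def bfs_search_full_path(world, start, goal, n):
--     """
--     BFS que retorna TODO el recorrido de exploración
--     nivel por nivel completo
--     """
--     queue = deque([(start, [start], [])])
--     visited = set([start])
--     full_exploration = [start]  # TODOS los pasos que da el algoritmo
--     flowers_found = []
--
--     while queue:
--         (current, path, flowers_collected) = queue.popleft()
--
--         # Verificar si hay flor en la posición actual
--         current_flowers = flowers_collected.copy()
--         if world.get(current) == "flower" and current not in flowers_collected: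
--             current_flowers.append(current)
--             if current not in flowers_found:
--                 flowers_found.append(current)
--
--         # Si llegamos a la meta, retornar todo lo explorado
--         if current == goal:
--             return full_exploration, current_flowers, path
--
--         x, y = current
--         # Movimientos: arriba, abajo, izquierda, derecha (orden BFS)
--         neighbors = [(x-1, y), (x+1, y), (x, y-1), (x, y+1)]
--
--         for nx, ny in neighbors:
--             if 0 <= nx < n and 0 <= ny < n:
--                 neighbor_pos = (nx, ny)
--                 if neighbor_pos not in visited and world.get(neighbor_pos) != "obstacle":
--                     visited.add(neighbor_pos)
--                     full_exploration.append(neighbor_pos)  # Registrar exploración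
--                     queue.append((neighbor_pos, path + [neighbor_pos], current_flowers))
--
--     return full_exploration, flowers_found, []
-- ===== SOURCE B (Python) =====
-- def bfs_search_full_path(world, start, goal, n):
--     """
--     Index-scan BFS: a single growing list 'order' doubles as the exploration
--     record and the queue (a cursor i marks the frontier), a parent map records
--     discovery, and the path and its flowers are rebuilt once, at the goal.
--     """
--     parent = {start: None}
--     order = [start]
--     i = 0
--     while i < len(order):
--         current = order[i]
--         if current == goal:
--             path = []
--             node = current
--             while node is not None:
--                 path.append(node)
--                 node = parent[node]
--             path.reverse()
--             return order, [p for p in path if world.get(p) == "flower"], path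
--         x, y = current
--         fresh = [nb for nb in ((x - 1, y), (x + 1, y), (x, y - 1), (x, y + 1))
--                  if 0 <= nb[0] < n and 0 <= nb[1] < n
--                  and nb not in parent and world.get(nb) != "obstacle"]
--         for nb in fresh:
--             parent[nb] = current
--         order.extend(fresh)
--         i += 1
--     return order, [p for p in order if world.get(p) == "flower"], []
-- ===== Notes on version B (the rewrite author's own statement) =====
-- stated objective: alternative
-- what changed: B drops A's deque of (position, full-path copy, flower-list copy): a single growing 'order' list with a cursor serves as both queue and exploration record, neighbours are batch-filtered into a 'fresh' list, a parent map records discovery, and the path and its flowers are rebuilt once at the goal (A copies a path and flower list per enqueued node; on big grids both are dominated by the grid exploration itself, so B is not measurably faster).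
import Mathlib
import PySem

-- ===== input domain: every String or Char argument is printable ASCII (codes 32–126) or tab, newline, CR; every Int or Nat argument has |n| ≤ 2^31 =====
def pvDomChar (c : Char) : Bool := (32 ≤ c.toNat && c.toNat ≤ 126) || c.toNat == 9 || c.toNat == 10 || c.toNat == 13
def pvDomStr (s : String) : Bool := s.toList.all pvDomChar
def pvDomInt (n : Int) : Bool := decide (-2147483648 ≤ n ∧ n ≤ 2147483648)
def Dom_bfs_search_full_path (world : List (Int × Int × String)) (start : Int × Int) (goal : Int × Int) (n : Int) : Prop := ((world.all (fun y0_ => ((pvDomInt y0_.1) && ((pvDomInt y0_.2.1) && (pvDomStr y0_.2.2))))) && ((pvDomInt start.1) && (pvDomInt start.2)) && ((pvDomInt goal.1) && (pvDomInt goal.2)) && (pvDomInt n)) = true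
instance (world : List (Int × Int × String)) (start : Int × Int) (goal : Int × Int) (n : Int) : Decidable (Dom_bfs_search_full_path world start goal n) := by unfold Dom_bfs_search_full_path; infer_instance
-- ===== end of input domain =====

-- B replaces A's deque of (position, full-path copy, flower-list copy) by an index-cursor
-- scan of one growing list plus a parent map; path and flowers are rebuilt once at the goal.

-- ===== PORT A =====
-- shared helpers: the Python dict 'world' (key (x, y)), grid test, neighbour list, flower test
abbrev PvPos : Type := Int × Int
abbrev PvEntry : Type := PvPos × List PvPos × List PvPos
abbrev PvPar : Type := PySem.Dict PvPos (Option PvPos)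

def wget (world : List (Int × Int × String)) (p : PvPos) : Option String :=
  PySem.Dict.get? (PySem.Dict.mk (world.map (fun e => ((e.1, e.2.1), e.2.2)))) p

def flowerB (world : List (Int × Int × String)) (p : PvPos) : Bool :=
  wget world p == some "flower"

def inGridB (n : Int) (p : PvPos) : Bool :=
  decide (0 ≤ p.1) && decide (p.1 < n) && decide (0 ≤ p.2) && decide (p.2 < n)

def neighbors (p : PvPos) : List PvPos :=
  [(p.1 - 1, p.2), (p.1 + 1, p.2), (p.1, p.2 - 1), (p.1, p.2 + 1)]

-- A's inner 'for nx, ny in neighbors' body: state (visited, full_exploration, queue)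
def pushA (world : List (Int × Int × String)) (n : Int) (path cf : List PvPos)
    (st : PySem.Set PvPos × List PvPos × List PvEntry) (nb : PvPos) :
    PySem.Set PvPos × List PvPos × List PvEntry :=
  if inGridB n nb && !(PySem.Set.contains st.1 nb) && !(wget world nb == some "obstacle") then
    (PySem.Set.add st.1 nb, st.2.1 ++ [nb], st.2.2 ++ [(nb, path ++ [nb], cf)])
  else st

-- the three lines of A's loop body that update current_flowers and flowers_found
def curFlowers (world : List (Int × Int × String)) (cur : PvPos) (fc : List PvPos) : List PvPos :=
  if flowerB world cur && !(List.contains fc cur) then fc ++ [cur] else fc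

def foundUpd (world : List (Int × Int × String)) (cur : PvPos) (fc found : List PvPos) : List PvPos :=
  if flowerB world cur && !(List.contains fc cur) && !(List.contains found cur) then found ++ [cur] else found

-- A's while loop.  The fuel argument is a totality guard only: each iteration dequeues
-- one entry and at most n²+1 cells (plus the start entry) are ever enqueued, so with the
-- initial fuel n²+2 the 0-fuel branch is never reached (the equivalence proof below goes
-- through the fuelled form on every admitted input).
def loopA (world : List (Int × Int × String)) (goal : PvPos) (n : Int) :
    Nat → List PvEntry → PySem.Set PvPos → List PvPos → List PvPos →
    (List PvPos) × (List PvPos) × (List PvPos)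
  | 0, _, _, expl, found => (expl, found, [])
  | _ + 1, [], _, expl, found => (expl, found, [])
  | fuel + 1, (cur, path, fc) :: rest, visited, expl, found =>
    let cf := curFlowers world cur fc
    let found' := foundUpd world cur fc found
    if cur = goal then (expl, cf, path)
    else
      let st := (neighbors cur).foldl (pushA world n path cf) (visited, expl, rest)
      loopA world goal n fuel st.2.2 st.1 st.2.1 found'

def bfs_search_full_path (world : List (Int × Int × String)) (start : Int × Int)
    (goal : Int × Int) (n : Int) : (List (Int × Int)) × (List (Int × Int)) × (List (Int × Int)) :=
  loopA world goal n (n.toNat * n.toNat + 2) [(start, [start], [])]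
    (PySem.Set.ofList [start]) [start] []

-- ===== PORT B =====
-- B's 'for nb in fresh: parent[nb] = current'
def insertAll (cur : PvPos) (parent : PvPar) (fresh : List PvPos) : PvPar :=
  fresh.foldl (fun d nb => PySem.Dict.insert d nb (some cur)) parent

-- B's path reconstruction: walk parent pointers from the goal collecting into acc, then
-- reverse; fuel ≥ chain length at every real call (the dict B builds has no cycles);
-- a missing key (Python KeyError, unreachable for B's dicts) stops the walk.
def rebuildB (parent : PvPar) : Nat → Option PvPos → List PvPos → List PvPos
  | _, none, acc => acc.reverse
  | 0, some _, acc => acc.reverse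
  | fuel + 1, some p, acc => rebuildB parent fuel ((PySem.Dict.get? parent p).getD none) (acc ++ [p])

-- B's while loop: a cursor i scans the growing 'order' list (queue = order[i:]).
-- The fuel argument is a totality guard only: BFS marks each of the ≤ n²+1 reachable
-- cells once, so with the initial fuel n²+2 the 0-fuel branch is never reached
-- (the equivalence proof below goes through the fuelled form on every admitted input).
def loopB (world : List (Int × Int × String)) (goal : PvPos) (n : Int) :
    Nat → List PvPos → PvPar → Nat → (List PvPos) × (List PvPos) × (List PvPos)
  | 0, order, _, _ => (order, order.filter (flowerB world), [])
  | fuel + 1, order, parent, i =>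
    if hlt : i < order.length then
      if order[i] = goal then
        let path := rebuildB parent (order.length + 1) (some order[i]) []
        (order, path.filter (flowerB world), path)
      else
        loopB world goal n fuel
          (order ++ (neighbors order[i]).filter (fun nb =>
            inGridB n nb && !(PySem.Dict.contains parent nb) && !(wget world nb == some "obstacle")))
          (insertAll order[i] parent ((neighbors order[i]).filter (fun nb =>
            inGridB n nb && !(PySem.Dict.contains parent nb) && !(wget world nb == some "obstacle"))))
          (i + 1)
    else (order, order.filter (flowerB world), [])

def bfs_search_full_path_alt (world : List (Int × Int × String)) (start : Int × Int)
    (goal : Int × Int) (n : Int) : (List (Int × Int)) × (List (Int × Int)) × (List (Int × Int)) :=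
  loopB world goal n (n.toNat * n.toNat + 2) [start]
    (PySem.Dict.insert PySem.Dict.empty start none) 0

-- ===== PRECONDITION & SPEC =====
def Spec_bfs_search_full_path (world : List (Int × Int × String)) (start : Int × Int) (goal : Int × Int) (n : Int) (out : (List (Int × Int)) × (List (Int × Int)) × (List (Int × Int))) : Prop := out = bfs_search_full_path_alt world start goal n
instance (world : List (Int × Int × String)) (start : Int × Int) (goal : Int × Int) (n : Int) (out : (List (Int × Int)) × (List (Int × Int)) × (List (Int × Int))) : Decidable (Spec_bfs_search_full_path world start goal n out) := by unfold Spec_bfs_search_full_path; infer_instance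

-- ===== CLAIM (what is proved, stated in full; the proofs are below) =====
def Claim_equal_bfs_search_full_path : Prop := ∀ (world : List (Int × Int × String)) (start : Int × Int) (goal : Int × Int) (n : Int), Dom_bfs_search_full_path world start goal n → Spec_bfs_search_full_path world start goal n (bfs_search_full_path world start goal n)

-- ===== LEMMAS AND PROOFS =====

-- duplicate-free position lists whose members (except possibly the start cell) lie in the grid
def InvV (n : Int) (v : List PvPos) : Prop :=
  v.Nodup ∧ ∃ s0, ∀ p ∈ v, inGridB n p = true ∨ p = s0

theorem pvGridBound (n : Int) (s0 : PvPos) (l : List PvPos) (hnd : l.Nodup)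
    (h : ∀ p ∈ l, inGridB n p = true ∨ p = s0) : l.length ≤ n.toNat * n.toNat + 1 := by
  classical
  have hsub : l.toFinset ⊆ insert s0 ((Finset.range n.toNat ×ˢ Finset.range n.toNat).image
      (fun q => ((q.1 : Int), (q.2 : Int)))) := by
    intro p hp
    rcases h p (List.mem_toFinset.mp hp) with hg | hs
    · obtain ⟨a, b⟩ := p
      simp only [inGridB, Bool.and_eq_true, decide_eq_true_eq] at hg
      refine Finset.mem_insert_of_mem (Finset.mem_image.mpr ⟨(a.toNat, b.toNat), ?_, ?_⟩)
      · simp only [Finset.mem_product, Finset.mem_range]; omega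
      · simp only [Prod.mk.injEq]; omega
    · exact hs ▸ Finset.mem_insert_self _ _
  calc l.length = l.toFinset.card := (List.toFinset_card_of_nodup hnd).symm
    _ ≤ _ := Finset.card_le_card hsub
    _ ≤ _ + 1 := Finset.card_insert_le _ _
    _ ≤ (Finset.range n.toNat ×ˢ Finset.range n.toNat).card + 1 := by
        exact Nat.add_le_add_right (Finset.card_image_le) 1
    _ = n.toNat * n.toNat + 1 := by simp [Finset.card_product]


-- the chain of parent pointers under r.head: r = cur, parent(cur), …, start
def ChainedR (parent : PvPar) : List PvPos → Prop
  | [] => False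
  | [p] => PySem.Dict.get? parent p = some none
  | p :: q :: t => PySem.Dict.get? parent p = some (some q) ∧ ChainedR parent (q :: t)

-- what A carries in a queue entry, expressed against B's parent map
def EntryInv (world : List (Int × Int × String)) (parent : PvPar) (e : PvEntry) : Prop :=
  e.2.1.getLast? = some e.1 ∧ e.2.1.Nodup ∧ (∀ p ∈ e.2.1, p ∈ parent.keys) ∧
  ChainedR parent e.2.1.reverse ∧ e.2.2 = e.2.1.dropLast.filter (flowerB world)

-- the simulation relation between A's loop state and B's loop state
def PvRel (world : List (Int × Int × String)) (qA : List PvEntry) (parent : PvPar)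
    (order found : List PvPos) (i : Nat) : Prop :=
  parent.keys = order ∧ order.Nodup ∧
  (∃ pr, i = pr.length ∧ order = pr ++ qA.map (·.1) ∧ found = pr.filter (flowerB world)) ∧
  ∀ e ∈ qA, EntryInv world parent e

theorem pvRebuildChain (parent : PvPar) :
    ∀ (t : List PvPos) (p : PvPos) (fuel : Nat) (acc : List PvPos),
      ChainedR parent (p :: t) → t.length < fuel →
      rebuildB parent fuel (some p) acc = (acc ++ p :: t).reverse := by
  intro t
  induction t with
  | nil =>
    intro p fuel acc hc hf
    obtain ⟨f, rfl⟩ : ∃ f, fuel = f + 1 := ⟨fuel - 1, by omega⟩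
    simp only [ChainedR] at hc
    simp [rebuildB, hc]
  | cons q t ih =>
    intro p fuel acc hc hf
    obtain ⟨f, rfl⟩ : ∃ f, fuel = f + 1 := ⟨fuel - 1, by omega⟩
    simp only [ChainedR] at hc
    rw [rebuildB, hc.1]
    simp only [Option.getD_some]
    rw [ih q f (acc ++ [p]) hc.2 (by simpa using Nat.lt_of_succ_lt_succ hf)]
    simp

theorem pvChainedMono (P P' : PvPar) :
    ∀ (r : List PvPos), (∀ p ∈ r, P'.get? p = P.get? p) → ChainedR P r → ChainedR P' r := by
  intro r
  induction r with
  | nil => intro _ hc; exact hc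
  | cons p t ih =>
    intro hagree hc
    cases t with
    | nil =>
      simp only [ChainedR] at hc ⊢
      rw [hagree p (by simp)]
      exact hc
    | cons q t' =>
      simp only [ChainedR] at hc ⊢
      refine ⟨?_, ih (fun x hx => hagree x (List.mem_cons_of_mem _ hx)) hc.2⟩
      rw [hagree p (by simp)]
      exact hc.1

theorem pvCurFlowersEq (world : List (Int × Int × String)) {path fc : List PvPos} {cur : PvPos}
    (hlast : path.getLast? = some cur) (hnd : path.Nodup)
    (hfc : fc = path.dropLast.filter (flowerB world)) :
    curFlowers world cur fc = path.filter (flowerB world) := by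
  obtain ⟨ini, rfl⟩ := List.getLast?_eq_some_iff.mp hlast
  rw [List.dropLast_concat] at hfc
  have hcni : cur ∉ ini := by
    rw [List.nodup_append] at hnd
    intro hmem
    exact hnd.2.2 cur hmem cur (by simp) rfl
  have hcnf : cur ∉ fc := fun hmem => hcni (List.mem_of_mem_filter (hfc ▸ hmem))
  unfold curFlowers
  rw [List.filter_append]
  by_cases hf : flowerB world cur = true
  · rw [if_pos (by simp only [hf, Bool.true_and, Bool.not_eq_true', Bool.not_eq_eq_eq_not]; simpa using hcnf)]
    rw [hfc]
    simp [hf]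
  · rw [if_neg (by simp [hf])]
    rw [hfc]
    simp [List.filter_singleton, hf]

-- an element appended to a set changes no other membership test
theorem pvContainsAppend (v : List PvPos) (nb p : PvPos) (h : p ≠ nb) :
    PySem.Set.contains (v ++ [nb]) p = PySem.Set.contains v p := by
  by_cases hp : p ∈ v
  · rw [(PySem.Set.contains_iff _ _).mpr hp,
      (PySem.Set.contains_iff _ _).mpr (List.mem_append_left _ hp)]
  · have h1 : PySem.Set.contains v p = false :=
      Bool.eq_false_iff.mpr (fun hh => hp ((PySem.Set.contains_iff _ _).mp hh))
    have h2 : PySem.Set.contains (v ++ [nb]) p = false :=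
      Bool.eq_false_iff.mpr (fun hh => by
        rcases List.mem_append.mp ((PySem.Set.contains_iff _ _).mp hh) with hm | hm
        · exact hp hm
        · exact h (by simpa using hm))
    rw [h1, h2]

-- A's incremental neighbour fold equals a batch filter against the initial visited set
theorem pushA_foldl (world : List (Int × Int × String)) (n : Int) (path cf : List PvPos) :
    ∀ (ns : List PvPos), ns.Nodup → ∀ (v e : List PvPos) (q : List PvEntry),
      ns.foldl (pushA world n path cf) (v, e, q)
        = (v ++ ns.filter (fun nb => inGridB n nb && !(PySem.Set.contains v nb) && !(wget world nb == some "obstacle")),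
           e ++ ns.filter (fun nb => inGridB n nb && !(PySem.Set.contains v nb) && !(wget world nb == some "obstacle")),
           q ++ (ns.filter (fun nb => inGridB n nb && !(PySem.Set.contains v nb) && !(wget world nb == some "obstacle"))).map
             (fun nb => (nb, path ++ [nb], cf))) := by
  intro ns
  induction ns with
  | nil => intro _ v e q; simp
  | cons nb ns ih =>
    intro hnd v e q
    have hnbns : nb ∉ ns := (List.nodup_cons.mp hnd).1
    simp only [List.foldl_cons]
    by_cases hcond : (inGridB n nb && !(PySem.Set.contains v nb) && !(wget world nb == some "obstacle")) = true
    · have hparts := hcond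
      simp only [Bool.and_eq_true, Bool.not_eq_true'] at hparts
      have hadd : PySem.Set.add v nb = v ++ [nb] := by
        simp only [PySem.Set.add, hparts.1.2, Bool.false_eq_true, if_false]
      have hstep : pushA world n path cf (v, e, q) nb
          = (v ++ [nb], e ++ [nb], q ++ [(nb, path ++ [nb], cf)]) := by
        simp only [pushA, hcond, if_pos, hadd]
      have hfil : ns.filter (fun p => inGridB n p && !(PySem.Set.contains (v ++ [nb]) p) && !(wget world p == some "obstacle"))
          = ns.filter (fun p => inGridB n p && !(PySem.Set.contains v p) && !(wget world p == some "obstacle")) := by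
        refine List.filter_congr (fun p hp => ?_)
        rw [pvContainsAppend v nb p (fun he => hnbns (he ▸ hp))]
      rw [hstep, ih (List.nodup_cons.mp hnd).2 (v ++ [nb]) (e ++ [nb]) (q ++ [(nb, path ++ [nb], cf)]), hfil,
        List.filter_cons, if_pos hcond]
      simp only [List.map_cons, List.append_assoc, List.singleton_append, List.cons_append, List.nil_append]
    · have hstep : pushA world n path cf (v, e, q) nb = (v, e, q) := by
        unfold pushA; rw [if_neg hcond]
      have hc' : (inGridB n nb && !(PySem.Set.contains v nb) && !(wget world nb == some "obstacle")) = false := by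
        simpa using hcond
      rw [hstep, ih (List.nodup_cons.mp hnd).2 v e q, List.filter_cons, if_neg hcond]

-- lookups through insertAll
theorem insertAll_get?_not_mem (cur : PvPos) (fresh : List PvPos) :
    ∀ (parent : PvPar) (k : PvPos), k ∉ fresh →
      (insertAll cur parent fresh).get? k = parent.get? k := by
  induction fresh with
  | nil => intro parent k _; rfl
  | cons nb rest ih =>
    intro parent k h
    have step : insertAll cur parent (nb :: rest)
        = insertAll cur (PySem.Dict.insert parent nb (some cur)) rest := rfl
    rw [step, ih _ k (fun hm => h (List.mem_cons_of_mem _ hm)),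
      PySem.Dict.get?_insert_of_ne parent (some cur) (fun he => h (by simp [he]))]

theorem insertAll_get?_mem (cur : PvPos) (fresh : List PvPos) :
    ∀ (parent : PvPar) (nb : PvPos), fresh.Nodup → nb ∈ fresh →
      (insertAll cur parent fresh).get? nb = some (some cur) := by
  induction fresh with
  | nil => intro _ _ _ h; cases h
  | cons a rest ih =>
    intro parent nb hnd h
    have step : insertAll cur parent (a :: rest)
        = insertAll cur (PySem.Dict.insert parent a (some cur)) rest := rfl
    rcases List.mem_cons.mp h with rfl | hm
    · rw [step, insertAll_get?_not_mem cur rest _ nb (List.nodup_cons.mp hnd).1,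
        PySem.Dict.get?_insert_self]
    · rw [step]
      exact ih _ nb (List.nodup_cons.mp hnd).2 hm

-- a key list determines the membership boolean, dict or set alike
theorem pvContainsKeys (parent : PvPar) (v : List PvPos) (h : parent.keys = v) (nb : PvPos) :
    PySem.Dict.contains parent nb = PySem.Set.contains v nb := by
  by_cases hm : nb ∈ v
  · rw [(PySem.Dict.contains_iff_mem_keys _ _).mpr (h ▸ hm), (PySem.Set.contains_iff _ _).mpr hm]
  · rw [Bool.eq_false_iff.mpr (fun hh => hm (h ▸ (PySem.Dict.contains_iff_mem_keys _ _).mp hh)),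
      Bool.eq_false_iff.mpr (fun hh => hm ((PySem.Set.contains_iff _ _).mp hh))]

-- the four neighbour cells are pairwise distinct
theorem neighbors_nodup (p : PvPos) : (neighbors p).Nodup := by
  obtain ⟨x, y⟩ := p
  simp [neighbors, Prod.ext_iff]
  omega

-- inserting a block of fresh distinct keys appends them to the key list
theorem insertAll_keys (cur : PvPos) (fresh : List PvPos) :
    ∀ (parent : PvPar), fresh.Nodup → (∀ nb ∈ fresh, nb ∉ parent.keys) →
      (insertAll cur parent fresh).keys = parent.keys ++ fresh := by
  induction fresh with
  | nil => intro parent _ _; simp [insertAll]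
  | cons nb rest ih =>
    intro parent hnd hf
    have hc : PySem.Dict.contains parent nb = false :=
      Bool.eq_false_iff.mpr (fun hh =>
        hf nb (List.mem_cons_self) ((PySem.Dict.contains_iff_mem_keys _ _).mp hh))
    have hkeys := PySem.Dict.keys_insert_of_not_contains parent (some cur) hc
    have step : insertAll cur parent (nb :: rest)
        = insertAll cur (PySem.Dict.insert parent nb (some cur)) rest := rfl
    rw [step, ih (PySem.Dict.insert parent nb (some cur)) (List.Nodup.of_cons hnd)
      (fun p hp hmem => by
        rw [hkeys] at hmem
        rcases List.mem_append.mp hmem with hm | hm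
        · exact hf p (List.mem_cons_of_mem _ hp) hm
        · have : p = nb := by simpa using hm
          exact (List.nodup_cons.mp hnd).1 (this ▸ hp)), hkeys]
    simp

theorem pvLoopEq (world : List (Int × Int × String)) (goal : PvPos) (n : Int) :
    ∀ (fuel : Nat) (qA : List PvEntry) (parent : PvPar) (order found : List PvPos) (i : Nat)
      (hA : InvV n order),
      parent.keys = order →
      n.toNat * n.toNat + 2 ≤ fuel + i →
      PvRel world qA parent order found i →
      loopA world goal n fuel qA order order found = loopB world goal n fuel order parent i := by
  intro fuel
  induction fuel with
  | zero =>
    intro qA parent order found i hA hk hfuel hrel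
    exfalso
    obtain ⟨hnd, s0, hmem⟩ := hA
    have hb := pvGridBound n s0 order hnd hmem
    obtain ⟨_, _, ⟨pr, hi, hpr, _⟩, _⟩ := hrel
    have : i ≤ order.length := by rw [hpr, hi]; simp
    omega
  | succ fuel ih =>
    intro qA parent order found i hA hk hfuel hrel
    cases qA with
    | nil =>
      obtain ⟨_, hnd, ⟨pr, hi, hpr, hfound⟩, _⟩ := hrel
      have hpr' : order = pr := by simpa using hpr
      rw [loopA, loopB, dif_neg (by rw [hi, hpr']; exact lt_irrefl _)]
      rw [hfound, hpr']
    | cons hd rest =>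
      obtain ⟨cur, path, fc⟩ := hd
      obtain ⟨_, hnd, ⟨pr, hi, hpr, hfound⟩, hentries⟩ := hrel
      obtain ⟨hlast, hpnd, hpmem, hchain, hfc⟩ :=
        hentries (cur, path, fc) (List.mem_cons_self)
      dsimp only at hlast hpnd hpmem hchain hfc
      have hlen_order : order.length = pr.length + ((rest.map (·.1)).length + 1) := by
        rw [hpr]; simp
      have hlt : i < order.length := by omega
      have hcur? : order[i]? = some cur := by
        rw [hpr, hi, List.getElem?_append_right (le_refl pr.length)]
        simp
      have hcur : order[i]'hlt = cur := by
        have h2 := List.getElem?_eq_getElem hlt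
        rw [hcur?] at h2
        exact (Option.some_inj.mp h2).symm
      have hcf : curFlowers world cur fc = path.filter (flowerB world) :=
        pvCurFlowersEq world hlast hpnd hfc
      obtain ⟨ini, hini⟩ := List.getLast?_eq_some_iff.mp hlast
      have hrev : path.reverse = cur :: ini.reverse := by rw [hini]; simp
      have hchain' : ChainedR parent (cur :: ini.reverse) := hrev ▸ hchain
      have hcni : cur ∉ ini := by
        have hpnd' := hpnd
        rw [hini, List.nodup_append] at hpnd'
        intro hmem
        exact hpnd'.2.2 cur hmem cur (by simp) rfl
      have hcfc : cur ∉ fc := by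
        rw [hfc, hini, List.dropLast_concat]
        intro hmem
        exact hcni (List.mem_of_mem_filter hmem)
      have hpmemO : ∀ p ∈ path, p ∈ order := fun p hp => hk ▸ hpmem p hp
      have hplen : path.length ≤ order.length :=
        (List.Nodup.subperm hpnd hpmemO).length_le
      rw [loopA, loopB, dif_pos hlt]
      simp only [hcur]
      by_cases hg : cur = goal
      · subst hg
        have hfuel2 : ini.reverse.length < order.length + 1 := by
          have : path.length = ini.length + 1 := by rw [hini]; simp
          simp only [List.length_reverse]
          omega
        have hre : rebuildB parent (order.length + 1) (some cur) [] = path := by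
          rw [pvRebuildChain parent ini.reverse cur (order.length + 1) [] hchain' hfuel2, hini]
          simp
        rw [if_pos rfl, if_pos rfl, hre, hcf]
      · rw [if_neg hg, if_neg hg]
        have hns := neighbors_nodup cur
        have hfold := pushA_foldl world n path (curFlowers world cur fc) (neighbors cur) hns order order rest
        have hfBA : (neighbors cur).filter (fun nb =>
              inGridB n nb && !(PySem.Dict.contains parent nb) && !(wget world nb == some "obstacle"))
            = (neighbors cur).filter (fun nb =>
              inGridB n nb && !(PySem.Set.contains order nb) && !(wget world nb == some "obstacle")) := by
          refine List.filter_congr (fun nb _ => ?_)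
          rw [pvContainsKeys parent order hk nb]
        rw [hfBA]
        set fA := (neighbors cur).filter (fun nb =>
          inGridB n nb && !(PySem.Set.contains order nb) && !(wget world nb == some "obstacle")) with hfAdef
        have hfAprop : ∀ nb ∈ fA, inGridB n nb = true ∧ nb ∉ order := by
          intro nb hnb
          have hc := (List.mem_filter.mp hnb).2
          simp only [Bool.and_eq_true, Bool.not_eq_true'] at hc
          refine ⟨hc.1.1, fun hm => ?_⟩
          rw [(PySem.Set.contains_iff _ _).mpr hm] at hc
          exact absurd hc.1.2 (by decide)
        have hfAnd : fA.Nodup := List.Nodup.filter _ hns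
        set parent' := insertAll cur parent fA with hpar'
        have hkeys' : parent'.keys = order ++ fA := by
          rw [hpar', insertAll_keys cur fA parent hfAnd
            (fun nb hnb hm => (hfAprop nb hnb).2 (hk ▸ hm)), hk]
        have hInv' : InvV n (order ++ fA) := by
          obtain ⟨hndO, s0, hmem⟩ := hA
          refine ⟨?_, s0, ?_⟩
          · rw [List.nodup_append]
            exact ⟨hndO, hfAnd, fun a ha b hb hab => (hfAprop b hb).2 (hab ▸ ha)⟩
          · intro p hp
            rcases List.mem_append.mp hp with hm | hm
            · exact hmem p hm
            · exact Or.inl (hfAprop p hm).1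
        have hpres : ∀ k ∈ order, parent'.get? k = parent.get? k := fun k hkm =>
          insertAll_get?_not_mem cur fA parent k (fun hkf => (hfAprop k hkf).2 hkm)
        have hfr2 : ∀ nb ∈ fA, parent'.get? nb = some (some cur) := fun nb hnb =>
          insertAll_get?_mem cur fA parent nb hfAnd hnb
        have hcurpr : cur ∉ pr := by
          have hnd' := hnd
          rw [hpr, List.nodup_append] at hnd'
          intro hc
          exact hnd'.2.2 cur hc cur (by simp) rfl
        have hcurfound : cur ∉ found := by
          rw [hfound]
          intro hc
          exact hcurpr (List.mem_of_mem_filter hc)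
        have hfnd' : foundUpd world cur fc found = (pr ++ [cur]).filter (flowerB world) := by
          unfold foundUpd
          rw [List.filter_append, ← hfound]
          by_cases hf : flowerB world cur = true
          · rw [if_pos (by
              rw [hf]
              have h1 : fc.contains cur = false := by simpa using hcfc
              have h2 : found.contains cur = false := by simpa using hcurfound
              rw [h1, h2]; rfl)]
            simp [hf]
          · simp only [Bool.not_eq_true] at hf
            rw [if_neg (by rw [hf]; simp)]
            simp [hf]
        have hrel' : PvRel world
            (rest ++ fA.map (fun nb => (nb, path ++ [nb], curFlowers world cur fc)))
            parent' (order ++ fA) (foundUpd world cur fc found) (i + 1) := by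
          refine ⟨hkeys', hInv'.1, ⟨pr ++ [cur], by simp [hi], ?_, hfnd'⟩, ?_⟩
          · rw [List.map_append, List.map_map]
            have hmapid : fA.map ((·.1) ∘ (fun nb => (nb, path ++ [nb], curFlowers world cur fc))) = fA := by
              simp only [Function.comp_def]
              exact List.map_id _
            rw [hmapid, hpr]
            simp [List.append_assoc]
          · intro ent hent
            rcases List.mem_append.mp hent with hent | hent
            · obtain ⟨hl1, hl2, hl3, hl4, hl5⟩ := hentries ent (List.mem_cons_of_mem _ hent)
              refine ⟨hl1, hl2, fun p hp => by
                  rw [hkeys']; exact List.mem_append_left _ (hk ▸ hl3 p hp), ?_, hl5⟩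
              exact pvChainedMono parent parent' _
                (fun p hp => hpres p (hk ▸ hl3 p (by simpa using hp))) hl4
            · obtain ⟨nb, hnb, rfl⟩ := List.mem_map.mp hent
              have hnbp := hfAprop nb hnb
              refine ⟨by simp, ?_, ?_, ?_, ?_⟩
              · rw [List.nodup_append]
                refine ⟨hpnd, List.nodup_singleton _, fun a ha b hb hab => ?_⟩
                have hb' : b = nb := by simpa using hb
                exact hnbp.2 (hb' ▸ hab ▸ hpmemO a ha)
              · intro p hp
                rw [hkeys']
                rcases List.mem_append.mp hp with hp | hp
                · exact List.mem_append_left _ (hpmemO p hp)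
                · have hp' : p = nb := by simpa using hp
                  exact List.mem_append_right _ (hp' ▸ hnb)
              · have hrev2 : (path ++ [nb]).reverse = nb :: cur :: ini.reverse := by
                  rw [hini]; simp
                show ChainedR parent' (path ++ [nb]).reverse
                rw [hrev2]
                exact ⟨hfr2 nb hnb, pvChainedMono parent parent' _
                  (fun p hp => hpres p (by
                    rw [← hrev] at hp
                    exact hpmemO p (List.mem_reverse.mp hp))) hchain'⟩
              · simp only [List.dropLast_concat]
                exact hcf
        rw [hfold]
        exact ih _ parent' (order ++ fA) _ (i + 1) hInv' hkeys' (by omega) hrel' 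

-- ===== VERDICT (by name: the statement is the Claim_ definition above) =====
theorem bfs_search_full_path_spec : Claim_equal_bfs_search_full_path := by
  intro world start goal n _
  unfold Spec_bfs_search_full_path bfs_search_full_path bfs_search_full_path_alt
  have hkeys : (PySem.Dict.insert PySem.Dict.empty start (none : Option PvPos)).keys = [start] := by
    rw [PySem.Dict.keys_insert_of_not_contains _ _ (PySem.Dict.contains_empty start)]
    simp [PySem.Dict.keys_empty]
  have hInv : InvV n [start] :=
    ⟨List.nodup_singleton _, start, fun p hp => Or.inr (by simpa using hp)⟩
  have hrel0 : PvRel world [(start, [start], [])]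
      (PySem.Dict.insert PySem.Dict.empty start (none : Option PvPos)) [start] [] 0 := by
    refine ⟨hkeys, List.nodup_singleton _, ⟨[], rfl, by simp, rfl⟩, ?_⟩
    intro ent hent
    have hent' : ent = (start, [start], ([] : List PvPos)) := by simpa using hent
    subst hent'
    refine ⟨by simp, List.nodup_singleton _, fun p hp => by
        rw [hkeys]; simpa using hp, ?_, by simp⟩
    simp only [List.reverse_singleton]
    show PySem.Dict.get? _ start = some none
    exact PySem.Dict.get?_insert_self _ _ _
  have h := pvLoopEq world goal n (n.toNat * n.toNat + 2)
    [(start, [start], [])] (PySem.Dict.insert PySem.Dict.empty start (none : Option PvPos))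
    [start] [] 0 hInv hkeys (by omega) hrel0
  exact h
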